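-- pv_equiv track=rewrite | github.com/827915432/Latex2Word | src/scripts/docx_postprocess.py | _group_aliases_by_primary
-- ===== SOURCE A (Python) =====
-- def _group_aliases_by_primary(
--     alias_to_primary: dict[str, str],
--     primary_labels: list[str],
-- ) -> dict[str, list[str]]:
--     grouped: dict[str, list[str]] = {}
--     for primary in primary_labels:
--         key = primary.strip()
--         if not key or key in grouped:
--             continue
--         grouped[key] = [key]
--
--     for alias, primary in alias_to_primary.items():
--         alias_key = alias.strip()
--         primary_key = primary.strip()
--         if not alias_key or not primary_key:
--             continue
--         bucket = grouped.get(primary_key)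
--         if bucket is None:
--             continue
--         if alias_key not in bucket:
--             bucket.append(alias_key)
--
--     return grouped
-- ===== SOURCE B (Python) =====
-- def _group_aliases_by_primary(
--     alias_to_primary: dict[str, str],
--     primary_labels: list[str],
-- ) -> dict[str, list[str]]:
--     # Pass 1: index each stripped, non-empty primary key to its aliases in order.
--     index: dict[str, list[str]] = {}
--     for alias, primary in alias_to_primary.items():
--         alias_key = alias.strip()
--         primary_key = primary.strip()
--         if alias_key and primary_key:
--             index.setdefault(primary_key, []).append(alias_key)
--     # Pass 2: emit one finished bucket per fresh primary label, deduping via a set.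
--     grouped: dict[str, list[str]] = {}
--     for primary in primary_labels:
--         key = primary.strip()
--         if not key or key in grouped:
--             continue
--         bucket = [key]
--         seen = {key}
--         for alias_key in index.get(key, []):
--             if alias_key not in seen:
--                 seen.add(alias_key)
--                 bucket.append(alias_key)
--         grouped[key] = bucket
--     return grouped
-- ===== Notes on version B (the rewrite author's own statement) =====
-- stated objective: alternative
-- what changed: B first builds an alias index keyed by stripped primary (inverting A's data flow: no live grouped dict is consulted while scanning aliases), then emits each bucket finished per fresh primary label, deduplicating with a seen-set instead of A's linear rescan of the growing bucket.
import Mathlib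
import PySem

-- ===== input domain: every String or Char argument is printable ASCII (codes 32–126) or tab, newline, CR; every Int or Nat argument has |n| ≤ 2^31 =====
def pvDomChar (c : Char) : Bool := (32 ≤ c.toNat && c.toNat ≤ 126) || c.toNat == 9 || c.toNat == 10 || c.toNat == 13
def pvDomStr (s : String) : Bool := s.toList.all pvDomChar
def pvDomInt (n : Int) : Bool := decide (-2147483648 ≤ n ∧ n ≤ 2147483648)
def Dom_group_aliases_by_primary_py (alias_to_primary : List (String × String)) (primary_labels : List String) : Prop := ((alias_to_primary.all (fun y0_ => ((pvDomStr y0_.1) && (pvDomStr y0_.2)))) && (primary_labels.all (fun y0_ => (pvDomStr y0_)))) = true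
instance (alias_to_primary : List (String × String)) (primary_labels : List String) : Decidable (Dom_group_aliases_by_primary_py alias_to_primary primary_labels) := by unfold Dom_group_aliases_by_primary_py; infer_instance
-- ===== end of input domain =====

-- B replaces A's append-into-live-buckets second loop by an alias index built first,
-- then emits each bucket finished, deduping with a seen-set instead of rescanning the bucket (alternative decomposition).

-- ===== PORT A =====
def group_aliases_by_primary_py (alias_to_primary : List (String × String)) (primary_labels : List String) : List (String × List String) :=
  let grouped0 : PySem.Dict String (List String) :=
    primary_labels.foldl (fun g primary =>
      let key := PySem.Str.strip primary
      if key == "" || g.contains key then g else g.insert key [key]) PySem.Dict.empty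
  let grouped :=
    alias_to_primary.foldl (fun g ap =>
      let alias_key := PySem.Str.strip ap.1
      let primary_key := PySem.Str.strip ap.2
      if alias_key == "" || primary_key == "" then g else
        match g.get? primary_key with
        | none => g
        | some bucket => if alias_key ∈ bucket then g else g.insert primary_key (bucket ++ [alias_key])) grouped0
  grouped.items

-- ===== PORT B =====
def group_aliases_by_primary_py_alt (alias_to_primary : List (String × String)) (primary_labels : List String) : List (String × List String) :=
  let index : PySem.Dict String (List String) :=
    alias_to_primary.foldl (fun d ap =>
      let alias_key := PySem.Str.strip ap.1
      let primary_key := PySem.Str.strip ap.2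
      if alias_key == "" || primary_key == "" then d
      else d.modify primary_key [] (· ++ [alias_key])) PySem.Dict.empty
  let grouped : PySem.Dict String (List String) :=
    primary_labels.foldl (fun g primary =>
      let key := PySem.Str.strip primary
      if key == "" || g.contains key then g else
        let bs := (index.getD key []).foldl
          (fun (bs : List String × PySem.Set String) a =>
            if bs.2.contains a then bs else (bs.1 ++ [a], bs.2.add a))
          ([key], PySem.Set.ofList [key])
        g.insert key bs.1) PySem.Dict.empty
  grouped.items

-- ===== PRECONDITION & SPEC =====
def Spec_group_aliases_by_primary_py (alias_to_primary : List (String × String)) (primary_labels : List String) (out : List (String × List String)) : Prop := out = group_aliases_by_primary_py_alt alias_to_primary primary_labels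
instance (alias_to_primary : List (String × String)) (primary_labels : List String) (out : List (String × List String)) : Decidable (Spec_group_aliases_by_primary_py alias_to_primary primary_labels out) := by unfold Spec_group_aliases_by_primary_py; infer_instance

-- ===== CLAIM (what is proved, stated in full; the proofs are below) =====
def Claim_equal_group_aliases_by_primary_py : Prop := ∀ (alias_to_primary : List (String × String)) (primary_labels : List String), Dom_group_aliases_by_primary_py alias_to_primary primary_labels → Spec_group_aliases_by_primary_py alias_to_primary primary_labels (group_aliases_by_primary_py alias_to_primary primary_labels)

-- ===== LEMMAS AND PROOFS =====

-- strip both components; none iff either side strips to empty (the shared skip test of both programs)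
def fpair (ap : String × String) : Option (String × String) :=
  if PySem.Str.strip ap.1 == "" || PySem.Str.strip ap.2 == "" then none
  else some (PySem.Str.strip ap.1, PySem.Str.strip ap.2)

-- stripped nonempty aliases whose stripped primary is k, in order
def aliasesOf (L : List (String × String)) (k : String) : List String :=
  ((L.filterMap fpair).filter (fun q => q.2 == k)).map (·.1)

def dstep (b : List String) (a : String) : List String := if a ∈ b then b else b ++ [a]
def dfold (b : List String) (xs : List String) : List String := xs.foldl dstep b

def stepA (g : PySem.Dict String (List String)) (q : String × String) : PySem.Dict String (List String) :=
  match g.get? q.2 with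
  | none => g
  | some bucket => if q.1 ∈ bucket then g else g.insert q.2 (bucket ++ [q.1])

def skipStep {β : Type} (g : β → (String × String) → β) (d : β) (ap : String × String) : β :=
  match fpair ap with
  | none => d
  | some q => g d q

lemma foldl_skip_filterMap {β : Type} (g : β → (String × String) → β) :
    ∀ (xs : List (String × String)) (b : β),
      xs.foldl (skipStep g) b = (xs.filterMap fpair).foldl g b := by
  intro xs
  induction xs with
  | nil => intro b; rfl
  | cons x xs ih =>
    intro b
    simp only [List.foldl_cons, List.filterMap_cons, skipStep]
    cases fpair x <;> simp [ih]

lemma seen_fold (xs : List String) :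
    ∀ (b : List String) (s : PySem.Set String), (∀ x, x ∈ s ↔ x ∈ b) →
      (xs.foldl (fun (bs : List String × PySem.Set String) a =>
          if bs.2.contains a then bs else (bs.1 ++ [a], bs.2.add a)) (b, s)).1
        = dfold b xs := by
  induction xs with
  | nil => intro b s _; rfl
  | cons a xs ih =>
    intro b s hs
    have hc : s.contains a = decide (a ∈ b) := by
      simp [PySem.Set.contains, hs a]
    rw [List.foldl_cons]
    by_cases hab : a ∈ b
    · rw [show (if s.contains a then ((b, s) : List String × PySem.Set String)
          else (b ++ [a], s.add a)) = (b, s) from by rw [hc]; simp [hab]]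
      rw [ih b s hs]
      simp [dfold, dstep, hab]
    · rw [show (if s.contains a then ((b, s) : List String × PySem.Set String)
          else (b ++ [a], s.add a)) = (b ++ [a], s.add a) from by rw [hc]; simp [hab]]
      rw [ih (b ++ [a]) (s.add a) (fun x => by
        rw [PySem.Set.mem_add]; simp [hs x, or_comm])]
      simp [dfold, dstep, hab]

lemma bucketB_eq (L : List (String × String)) (k : String) :
    ((((L.foldl (fun d ap =>
        let alias_key := PySem.Str.strip ap.1
        let primary_key := PySem.Str.strip ap.2
        if alias_key == "" || primary_key == "" then d
        else d.modify primary_key [] (· ++ [alias_key])) PySem.Dict.empty)).getD k []).foldl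
          (fun (bs : List String × PySem.Set String) a =>
            if bs.2.contains a then bs else (bs.1 ++ [a], bs.2.add a))
          ([k], PySem.Set.ofList [k])).1
      = dfold [k] (aliasesOf L k) := by
  have hfun : (fun (d : PySem.Dict String (List String)) (ap : String × String) =>
        let alias_key := PySem.Str.strip ap.1
        let primary_key := PySem.Str.strip ap.2
        if alias_key == "" || primary_key == "" then d
        else d.modify primary_key [] (· ++ [alias_key]))
      = skipStep (fun d q => d.modify q.2 [] (· ++ [q.1])) := by
    funext d ap
    simp only [fpair, skipStep]
    split <;> simp_all
  rw [hfun, foldl_skip_filterMap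
    (fun (d : PySem.Dict String (List String)) q => d.modify q.2 [] (· ++ [q.1]))]
  have hidx : ((L.filterMap fpair).foldl
      (fun (d : PySem.Dict String (List String)) q => d.modify q.2 [] (· ++ [q.1]))
      PySem.Dict.empty).getD k [] = aliasesOf L k := by
    have h2 := PySem.Dict.getD_foldl_modify_append ((L.filterMap fpair).map Prod.swap)
      (PySem.Dict.empty : PySem.Dict String (List String)) k
    rw [List.foldl_map] at h2
    simp only [Prod.fst_swap, Prod.snd_swap] at h2
    rw [h2]
    rw [List.filter_map, List.map_map]
    simp only [aliasesOf, PySem.Dict.getD_empty, List.nil_append]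
    rfl
  rw [hidx]
  exact seen_fold _ [k] (PySem.Set.ofList [k]) (fun x => by simp [PySem.Set.mem_ofList])

lemma loopA2 (Q : List (String × String)) :
    ∀ (G : PySem.Dict String (List String)), G.keys.Nodup →
      (Q.foldl stepA G).items
        = G.items.map (fun e => (e.1, dfold e.2 ((Q.filter (fun q => q.2 == e.1)).map (·.1)))) := by
  induction Q with
  | nil => intro G _; simp [dfold]
  | cons q Q ih =>
    intro G hnd
    rw [List.foldl_cons]
    rcases hG : G.get? q.2 with _ | bucket
    · have hstep : stepA G q = G := by simp [stepA, hG]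
      rw [hstep, ih G hnd]
      apply List.map_congr_left
      intro e he
      have hne : e.1 ≠ q.2 := by
        intro h
        exact ((PySem.Dict.get?_eq_none_iff_not_mem_keys G q.2).1 hG)
          (h ▸ PySem.Dict.mem_keys_of_mem_items G he)
      simp [Ne.symm hne]
    · by_cases hmem : q.1 ∈ bucket
      · have hstep : stepA G q = G := by simp [stepA, hG, hmem]
        rw [hstep, ih G hnd]
        apply List.map_congr_left
        intro e he
        by_cases h : e.1 = q.2
        · have hb : e.2 = bucket := by
            have h3 := PySem.Dict.get?_of_mem_items G (Prod.mk.eta (p := e) ▸ he) hnd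
            rw [h, hG] at h3
            exact (Option.some.inj h3).symm
          simp [h, hb, dfold, dstep, hmem]
        · simp [Ne.symm h]
      · have hstep : stepA G q = G.insert q.2 (bucket ++ [q.1]) := by
          simp [stepA, hG, hmem]
        have hkmem : q.2 ∈ G.keys := by
          by_contra hk
          have h4 := (PySem.Dict.get?_eq_none_iff_not_mem_keys G q.2).2 hk
          rw [hG] at h4
          simp at h4
        have hcont : G.contains q.2 = true := by
          rw [PySem.Dict.contains_eq_decide_mem_keys]; exact decide_eq_true hkmem
        have hnd' : (G.insert q.2 (bucket ++ [q.1])).keys.Nodup := by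
          rw [PySem.Dict.keys_insert_of_contains G _ hcont]; exact hnd
        rw [hstep, ih _ hnd', PySem.Dict.items_insert_of_contains G _ hcont, List.map_map]
        apply List.map_congr_left
        intro e he
        by_cases h : e.1 = q.2
        · have hb : e.2 = bucket := by
            have h3 := PySem.Dict.get?_of_mem_items G (Prod.mk.eta (p := e) ▸ he) hnd
            rw [h, hG] at h3
            exact (Option.some.inj h3).symm
          simp [Function.comp, h, hb, dfold, dstep, hmem]
        · have hbeq : (e.1 == q.2) = false := by simp [h]
          simp [Function.comp, hbeq, Ne.symm h]

lemma nodup_foldA1 (labels : List String) :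
    ∀ (G : PySem.Dict String (List String)), G.keys.Nodup →
      (labels.foldl (fun G primary =>
        if PySem.Str.strip primary == "" || G.contains (PySem.Str.strip primary) then G
        else G.insert (PySem.Str.strip primary) [PySem.Str.strip primary]) G).keys.Nodup := by
  induction labels with
  | nil => intro G h; exact h
  | cons l labels ih =>
    intro G h
    rw [List.foldl_cons]
    split
    · exact ih G h
    · exact ih _ (PySem.Dict.nodup_keys_insert G _ _ h)

lemma loopsB (aof : String → List String) (bk : String → List String)
    (hbk : ∀ k, bk k = dfold [k] (aof k)) :
    ∀ (labels : List String) (G g : PySem.Dict String (List String)),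
      g.items = G.items.map (fun e => (e.1, dfold e.2 (aof e.1))) →
      (labels.foldl (fun g primary =>
          if PySem.Str.strip primary == "" || g.contains (PySem.Str.strip primary) then g
          else g.insert (PySem.Str.strip primary) (bk (PySem.Str.strip primary))) g).items
        = (labels.foldl (fun G primary =>
          if PySem.Str.strip primary == "" || G.contains (PySem.Str.strip primary) then G
          else G.insert (PySem.Str.strip primary) [PySem.Str.strip primary]) G).items.map
            (fun e => (e.1, dfold e.2 (aof e.1))) := by
  intro labels
  induction labels with
  | nil => intro G g h; exact h
  | cons l labels ih =>
    intro G g h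
    have hkeys : g.keys = G.keys := by
      show g.items.map (·.1) = G.items.map (·.1)
      rw [h, List.map_map]
      rfl
    have hcont : g.contains (PySem.Str.strip l) = G.contains (PySem.Str.strip l) := by
      rw [PySem.Dict.contains_eq_decide_mem_keys, PySem.Dict.contains_eq_decide_mem_keys, hkeys]
    simp only [List.foldl_cons, hcont]
    split
    · exact ih G g h
    · rename_i hcnd
      apply ih
      have hGc : G.contains (PySem.Str.strip l) = false := by
        cases hcg : G.contains (PySem.Str.strip l) with
        | false => rfl
        | true => exact absurd (by simp [hcg]) hcnd
      have hgc : g.contains (PySem.Str.strip l) = false := by rw [hcont]; exact hGc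
      rw [PySem.Dict.items_insert_of_not_contains g _ hgc,
          PySem.Dict.items_insert_of_not_contains G _ hGc, List.map_append, h]
      simp [hbk, dfold]

theorem group_aliases_by_primary_py_spec : Claim_equal_group_aliases_by_primary_py := by
  intro atp labels _
  show (atp.foldl (fun g ap =>
      let alias_key := PySem.Str.strip ap.1
      let primary_key := PySem.Str.strip ap.2
      if alias_key == "" || primary_key == "" then g else
        match g.get? primary_key with
        | none => g
        | some bucket => if alias_key ∈ bucket then g else g.insert primary_key (bucket ++ [alias_key]))
      (labels.foldl (fun G primary =>
        if PySem.Str.strip primary == "" || G.contains (PySem.Str.strip primary) then G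
        else G.insert (PySem.Str.strip primary) [PySem.Str.strip primary]) PySem.Dict.empty)).items
    = (labels.foldl (fun g primary =>
        if PySem.Str.strip primary == "" || g.contains (PySem.Str.strip primary) then g
        else g.insert (PySem.Str.strip primary)
          ((((atp.foldl (fun d ap =>
              let alias_key := PySem.Str.strip ap.1
              let primary_key := PySem.Str.strip ap.2
              if alias_key == "" || primary_key == "" then d
              else d.modify primary_key [] (· ++ [alias_key])) PySem.Dict.empty)).getD
                (PySem.Str.strip primary) []).foldl
            (fun (bs : List String × PySem.Set String) a =>
              if bs.2.contains a then bs else (bs.1 ++ [a], bs.2.add a))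
            ([PySem.Str.strip primary], PySem.Set.ofList [PySem.Str.strip primary])).1)
      PySem.Dict.empty).items
  have hfunA : (fun (g : PySem.Dict String (List String)) (ap : String × String) =>
      let alias_key := PySem.Str.strip ap.1
      let primary_key := PySem.Str.strip ap.2
      if alias_key == "" || primary_key == "" then g else
        match g.get? primary_key with
        | none => g
        | some bucket => if alias_key ∈ bucket then g else g.insert primary_key (bucket ++ [alias_key]))
      = skipStep stepA := by
    funext g ap
    simp only [fpair, stepA, skipStep]
    split <;> simp_all
  rw [hfunA, foldl_skip_filterMap stepA]
  rw [loopA2 _ _ (nodup_foldA1 labels PySem.Dict.empty List.nodup_nil)]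
  exact (loopsB (aliasesOf atp) _ (fun k => bucketB_eq atp k) labels PySem.Dict.empty
    PySem.Dict.empty rfl).symm
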